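-- pv_equiv track=rewrite | github.com/rlecomte1929/rolec | backend/services/policy_template_first_import.py | _merge_coverage_statuses
-- ===== SOURCE A (Python) =====
-- from typing import Any, Dict, List, Optional, Sequence, Tuple
--
-- def _merge_coverage_statuses(statuses: Sequence[str]) -> str:
--     xs = [str(s or "mentioned") for s in statuses if s]
--     if not xs:
--         return "mentioned"
--     if any(x == "excluded" for x in xs):
--         return "excluded"
--     rank = {
--         "ambiguous": 1,
--         "mentioned": 2,
--         "covered": 3,
--         "specified": 4,
--         "capped_external": 5,
--     }
--     best = "mentioned"
--     best_r = 0
--     for x in xs: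
--         r = rank.get(x, 0)
--         if r > best_r:
--             best_r = r
--             best = x
--     return best
-- ===== SOURCE B (Python) =====
-- _PRIORITY = ["excluded", "capped_external", "specified", "covered", "mentioned", "ambiguous"]
--
-- def _merge_coverage_statuses(statuses):
--     present = {str(s) for s in statuses if s}
--     for p in _PRIORITY:
--         if p in present:
--             return p
--     return "mentioned"
-- ===== Notes on version B (the rewrite author's own statement) =====
-- stated objective: idiomatic
-- what changed: B builds one membership set of the non-empty statuses and scans the fixed priority ranking for the first present status, instead of A's input scan tracking a running maximum rank with a special-cased 'excluded' pass.
import Mathlib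
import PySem

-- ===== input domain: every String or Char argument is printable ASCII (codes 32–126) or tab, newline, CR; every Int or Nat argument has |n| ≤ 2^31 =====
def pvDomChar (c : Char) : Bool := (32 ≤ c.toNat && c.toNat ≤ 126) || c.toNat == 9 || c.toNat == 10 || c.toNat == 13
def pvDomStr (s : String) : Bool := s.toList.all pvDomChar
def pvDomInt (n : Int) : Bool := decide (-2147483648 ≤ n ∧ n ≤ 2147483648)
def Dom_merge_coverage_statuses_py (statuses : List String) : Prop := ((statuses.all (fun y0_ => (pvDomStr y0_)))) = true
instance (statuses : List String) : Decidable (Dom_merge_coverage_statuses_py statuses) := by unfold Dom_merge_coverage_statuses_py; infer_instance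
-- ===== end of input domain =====

-- B is more idiomatic: it scans the fixed priority ranking with set-membership tests instead of scanning the input while tracking a running maximum rank.

-- ===== PORT A =====
def merge_coverage_statuses_py (statuses : List String) : String :=
  let xs := (statuses.filter (fun s => s != "")).map (fun s => if s = "" then "mentioned" else s)
  if xs = [] then "mentioned"
  else if xs.any (fun x => x == "excluded") then "excluded"
  else
    let rank : PySem.Dict String Int :=
      PySem.Dict.mk [("ambiguous", 1), ("mentioned", 2), ("covered", 3), ("specified", 4), ("capped_external", 5)]
    let st := xs.foldl (fun (st : String × Int) x =>
      let r := rank.getD x 0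
      if r > st.2 then (x, r) else st) ("mentioned", 0)
    st.1

-- ===== PORT B =====
def pvPriority : List String := ["excluded", "capped_external", "specified", "covered", "mentioned", "ambiguous"]

def merge_coverage_statuses_py_alt (statuses : List String) : String :=
  let present : PySem.Set String := PySem.Set.ofList (statuses.filter (fun s => s != ""))
  (pvPriority.find? (fun p => PySem.Set.contains present p)).getD "mentioned"

-- ===== PRECONDITION & SPEC =====
def Spec_merge_coverage_statuses_py (statuses : List String) (out : String) : Prop := out = merge_coverage_statuses_py_alt statuses
instance (statuses : List String) (out : String) : Decidable (Spec_merge_coverage_statuses_py statuses out) := by unfold Spec_merge_coverage_statuses_py; infer_instance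

-- ===== CLAIM (what is proved, stated in full; the proofs are below) =====
def Claim_equal_merge_coverage_statuses_py : Prop := ∀ (statuses : List String), Dom_merge_coverage_statuses_py statuses → Spec_merge_coverage_statuses_py statuses (merge_coverage_statuses_py statuses)

-- ===== LEMMAS AND PROOFS =====

/-- The rank dictionary of A, as a plain function. -/
def rankFn (x : String) : Int :=
  if x = "capped_external" then 5
  else if x = "specified" then 4
  else if x = "covered" then 3
  else if x = "mentioned" then 2
  else if x = "ambiguous" then 1
  else 0

/-- The status name with a given (positive) rank; 0 and unknown ranks give the default. -/
def nm (r : Int) : String :=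
  if r = 5 then "capped_external"
  else if r = 4 then "specified"
  else if r = 3 then "covered"
  else if r = 1 then "ambiguous"
  else "mentioned"

def Mfold (l : List String) (r : Int) : Int := l.foldl (fun a x => max a (rankFn x)) r

lemma rank_getD (x : String) :
    (PySem.Dict.mk [("ambiguous", (1:Int)), ("mentioned", 2), ("covered", 3), ("specified", 4), ("capped_external", 5)]).getD x 0 = rankFn x := by
  simp only [PySem.Dict.getD, PySem.Dict.get?_mk_cons, beq_iff_eq, rankFn]
  by_cases h1 : x = "ambiguous" <;> by_cases h2 : x = "mentioned" <;>
    by_cases h3 : x = "covered" <;> by_cases h4 : x = "specified" <;>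
    by_cases h5 : x = "capped_external" <;> simp_all [PySem.Dict.get?] <;> split_ifs <;> simp_all

lemma rankFn_nonneg (x : String) : 0 ≤ rankFn x := by
  unfold rankFn; split_ifs <;> norm_num

lemma rankFn_le_five (x : String) : rankFn x ≤ 5 := by
  unfold rankFn; split_ifs <;> norm_num

lemma nm_rankFn (x : String) (h : 0 < rankFn x) : nm (rankFn x) = x := by
  unfold rankFn at h ⊢
  split_ifs at h ⊢ with h1 h2 h3 h4 h5 <;> simp_all [nm]

lemma fold_char (l : List String) (r : Int) (h0 : 0 ≤ r) :
    l.foldl (fun (st : String × Int) x => if rankFn x > st.2 then (x, rankFn x) else st) (nm r, r)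
      = (nm (Mfold l r), Mfold l r) := by
  induction l generalizing r with
  | nil => simp [Mfold]
  | cons x t ih =>
    simp only [List.foldl_cons, Mfold, ]
    by_cases h : rankFn x > r
    · have hx : nm (rankFn x) = x := nm_rankFn x (lt_of_le_of_lt h0 h)
      have hm : max r (rankFn x) = rankFn x := by omega
      rw [if_pos h, show (x, rankFn x) = (nm (rankFn x), rankFn x) from by rw [hx]]
      simpa [Mfold, hm] using ih (rankFn x) (rankFn_nonneg x)
    · have hm : max r (rankFn x) = r := by omega
      rw [if_neg h]
      simpa [Mfold, hm] using ih r h0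

lemma M_ge (l : List String) (r : Int) : r ≤ Mfold l r := by
  induction l generalizing r with
  | nil => simp [Mfold]
  | cons x t ih =>
    have := ih (max r (rankFn x))
    simp only [Mfold, List.foldl_cons] at *
    omega

lemma M_mem (l : List String) (x : String) (h : x ∈ l) : ∀ (r : Int), rankFn x ≤ Mfold l r := by
  induction l with
  | nil => cases h
  | cons y t ih =>
    intro r
    rcases List.mem_cons.mp h with h | h
    · subst h
      have := M_ge t (max r (rankFn x))
      simp only [Mfold, List.foldl_cons] at *
      omega
    · simpa [Mfold] using ih h (max r (rankFn y))

lemma M_le (l : List String) (k : Int) (h : ∀ x ∈ l, rankFn x ≤ k) :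
    ∀ (r : Int), r ≤ k → Mfold l r ≤ k := by
  induction l with
  | nil => intro r hr; simpa [Mfold]
  | cons x t ih =>
    intro r hr
    have hx := h x (List.mem_cons_self)
    simp only [Mfold, List.foldl_cons]
    exact ih (fun y hy => h y (List.mem_cons_of_mem _ hy)) (max r (rankFn x)) (by omega)

lemma any_beq (l : List String) (a : String) : l.any (fun x => x == a) = decide (a ∈ l) := by
  induction l with
  | nil => simp
  | cons x t ih =>
    by_cases h : x = a
    · simp [h]
    · simp [h, ih, Ne.symm h]

lemma filter_map_self (l : List String) :
    (l.filter (fun s => s != "")).map (fun s => if s = "" then "mentioned" else s)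
      = l.filter (fun s => s != "") := by
  have h : ∀ s ∈ l.filter (fun s => s != ""), (if s = "" then "mentioned" else s) = id s := by
    intro s hs
    have := List.of_mem_filter hs
    simp at this
    simp [this]
  rw [List.map_congr_left h, List.map_id]

theorem merge_statuses_eq (statuses : List String) :
    merge_coverage_statuses_py statuses = merge_coverage_statuses_py_alt statuses := by
  unfold merge_coverage_statuses_py merge_coverage_statuses_py_alt
  rw [filter_map_self]
  set f := statuses.filter (fun s => s != "") with hf
  simp only [rank_getD, any_beq, pvPriority, List.find?]
  have hcont : ∀ p : String, PySem.Set.contains (PySem.Set.ofList f) p = decide (p ∈ f) := by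
    intro p
    by_cases h : p ∈ f <;>
      simp [PySem.Set.contains_eq_listContains, PySem.Set.mem_ofList, h]
  simp only [hcont]
  by_cases hnil : f = []
  · simp [hnil]
  · rw [if_neg hnil]
    by_cases he : "excluded" ∈ f
    · simp [he]
    · rw [show (decide ("excluded" ∈ f)) = false from by simp [he]]
      simp only [if_false, Bool.false_eq_true]
      have hfold := fold_char f 0 (by norm_num)
      rw [show nm 0 = "mentioned" from rfl] at hfold
      rw [hfold]
      -- now the goal is about nm (Mfold f 0) vs the priority scan
      have hge : (0:Int) ≤ Mfold f 0 := M_ge f 0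
      by_cases h5 : "capped_external" ∈ f
      · have h1 : Mfold f 0 = 5 := le_antisymm (M_le f 5 (fun x _ => rankFn_le_five x) 0 (by norm_num))
          (by simpa [rankFn] using M_mem f _ h5 0)
        simp [h1, h5, nm]
      · have hb5 : ∀ x ∈ f, rankFn x ≤ 4 := by
          intro x hx; unfold rankFn; split_ifs with hc <;> try norm_num
          exact absurd (hc ▸ hx) h5
        by_cases h4 : "specified" ∈ f
        · have h1 : Mfold f 0 = 4 := le_antisymm (M_le f 4 hb5 0 (by norm_num))
            (by simpa [rankFn] using M_mem f _ h4 0)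
          simp [h1, h4, h5, nm]
        · have hb4 : ∀ x ∈ f, rankFn x ≤ 3 := by
            intro x hx
            have := hb5 x hx
            unfold rankFn at this ⊢; split_ifs at this ⊢ with hc1 hc2 <;> try omega
            exact absurd (hc2 ▸ hx) h4
          by_cases h3 : "covered" ∈ f
          · have h1 : Mfold f 0 = 3 := le_antisymm (M_le f 3 hb4 0 (by norm_num))
              (by simpa [rankFn] using M_mem f _ h3 0)
            simp [h1, h3, h4, h5, nm]
          · have hb3 : ∀ x ∈ f, rankFn x ≤ 2 := by
              intro x hx
              have := hb4 x hx
              unfold rankFn at this ⊢; split_ifs at this ⊢ with hc1 hc2 hc3 <;> try omega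
              exact absurd (hc3 ▸ hx) h3
            by_cases h2 : "mentioned" ∈ f
            · have h1 : Mfold f 0 = 2 := le_antisymm (M_le f 2 hb3 0 (by norm_num))
                (by simpa [rankFn] using M_mem f _ h2 0)
              simp [h1, h2, h3, h4, h5, nm]
            · have hb2 : ∀ x ∈ f, rankFn x ≤ 1 := by
                intro x hx
                have := hb3 x hx
                unfold rankFn at this ⊢; split_ifs at this ⊢ with hc1 hc2 hc3 hc4 <;> try omega
                exact absurd (hc4 ▸ hx) h2
              by_cases hA : "ambiguous" ∈ f
              · have h1 : Mfold f 0 = 1 := le_antisymm (M_le f 1 hb2 0 (by norm_num))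
                  (by simpa [rankFn] using M_mem f _ hA 0)
                simp [h1, hA, h2, h3, h4, h5, nm]
              · have hb1 : ∀ x ∈ f, rankFn x ≤ 0 := by
                  intro x hx
                  have := hb2 x hx
                  unfold rankFn at this ⊢; split_ifs at this ⊢ with hc1 hc2 hc3 hc4 hc5 <;> try omega
                  exact absurd (hc5 ▸ hx) hA
                have h1 : Mfold f 0 = 0 := le_antisymm (M_le f 0 hb1 0 le_rfl) hge
                simp [h1, hA, h2, h3, h4, h5, nm]

-- ===== VERDICT (by name: the statement is the Claim_ definition above) =====
theorem merge_coverage_statuses_py_spec : Claim_equal_merge_coverage_statuses_py := by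
  intro statuses _
  exact merge_statuses_eq statuses
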